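-- pv_equiv track=rewrite | github.com/seregazakharin/tfl_lab3 | main.py | replace_terminals
-- ===== SOURCE A (Python) =====
-- from collections import defaultdict, deque
--
-- def replace_terminals(grammar):
--     """Заменяет все терминалы в длинных правилах на нетерминалы."""
--     terminal_map = {}
--     new_grammar = defaultdict(list)
--     counter = 1
--
--     for lhs, rules in grammar.items():
--         for rule in rules:
--             if len(rule) > 1:
--                 new_rule = []
--                 for symbol in rule:
--                     if symbol.islower() and symbol[0] != '[':
--                         if symbol not in terminal_map:
--                             new_nonterminal = f"!_{counter}"
--                             counter += 1
--                             terminal_map[symbol] = new_nonterminal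
--                             new_grammar[new_nonterminal].append([symbol])
--                         new_rule.append(terminal_map[symbol])
--                     else:
--                         new_rule.append(symbol)
--                 new_grammar[lhs].append(new_rule)
--             else:
--                 new_grammar[lhs].append(rule)
--
--     return new_grammar
-- ===== SOURCE B (Python) =====
-- from collections import defaultdict
--
-- def replace_terminals(grammar):
--     """Заменяет все терминалы в длинных правилах на нетерминалы."""
--     # Pass 1: name every terminal occurring in a long rule, in order of first appearance.
--     terminal_map = {}
--     for rules in grammar.values():
--         for rule in rules:
--             if len(rule) > 1:
--                 for symbol in rule:
--                     if symbol.islower() and symbol[0] != '[' and symbol not in terminal_map: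
--                         terminal_map[symbol] = f"!_{len(terminal_map) + 1}"
--
--     # Pass 2: rebuild the grammar through the finished map; a singleton rule for a
--     # new nonterminal is added the first time that nonterminal is actually used.
--     new_grammar = defaultdict(list)
--     for lhs, rules in grammar.items():
--         for rule in rules:
--             if len(rule) > 1:
--                 for symbol in rule:
--                     if symbol in terminal_map and terminal_map[symbol] not in new_grammar:
--                         new_grammar[terminal_map[symbol]].append([symbol])
--                 new_grammar[lhs].append([terminal_map.get(s, s) for s in rule])
--             else:
--                 new_grammar[lhs].append(rule)
--
--     return new_grammar
-- ===== Notes on version B (the rewrite author's own statement) =====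
-- stated objective: alternative
-- what changed: B splits A's single interleaved loop (which grows the terminal map, a fresh-name counter and the output defaultdict all at once) into two staged passes: a naming pass that builds the complete terminal map first, then a rebuild pass that rewrites every long rule by pure lookup (a tmap.get comprehension) and adds each new nonterminal's singleton rule at its first use; …
import Mathlib
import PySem

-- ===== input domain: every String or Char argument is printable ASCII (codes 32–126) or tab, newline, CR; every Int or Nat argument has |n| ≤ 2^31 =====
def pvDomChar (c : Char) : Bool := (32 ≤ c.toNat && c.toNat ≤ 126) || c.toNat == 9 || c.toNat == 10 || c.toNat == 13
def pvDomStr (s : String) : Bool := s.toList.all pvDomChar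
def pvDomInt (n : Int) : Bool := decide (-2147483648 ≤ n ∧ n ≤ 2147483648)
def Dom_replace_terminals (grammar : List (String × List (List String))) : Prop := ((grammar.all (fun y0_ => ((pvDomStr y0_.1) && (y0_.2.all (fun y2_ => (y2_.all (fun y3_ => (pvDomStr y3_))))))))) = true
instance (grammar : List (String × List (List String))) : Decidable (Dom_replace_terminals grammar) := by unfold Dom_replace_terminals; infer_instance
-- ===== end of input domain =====

-- B replaces A's single interleaved pass (map-building, counter and output mutation mixed in
-- one loop nest) by two staged passes: a naming pass that builds the complete terminal map
-- first, then a rebuild pass that rewrites every rule by pure lookup; objective: alternative.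

-- ===== PORT A =====
-- Python `symbol.islower()`: at least one cased character and no uppercase one — exact on the
-- ASCII domain, where the cased characters are exactly the letters.
def pvStrIslower (s : String) : Bool :=
  s.toList.any (fun c => PySem.Chars.islower c) && s.toList.all (fun c => !PySem.Chars.isupper c)

-- Python `symbol.islower() and symbol[0] != '['` (short-circuit: islower ⇒ nonempty, so the
-- index never raises).
def pvQual (symbol : String) : Bool :=
  pvStrIslower symbol && (PySem.Str.pyGet? symbol 0 != some '[')

-- body of A's inner `for symbol in rule` loop; state (terminal_map, new_grammar, counter, new_rule)
def pvA_sym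
    (acc : PySem.Dict String String × PySem.Dict String (List (List String)) × Int × List String)
    (symbol : String) :
    PySem.Dict String String × PySem.Dict String (List (List String)) × Int × List String :=
  let (tm, ng, c, nr) := acc
  if pvQual symbol then
    match tm.get? symbol with
    | some name => (tm, ng, c, nr ++ [name])
    | none =>
      let name := "!_" ++ PySem.Int.toStr c
      (tm.insert symbol name, ng.modify name [] (fun v => v ++ [[symbol]]), c + 1, nr ++ [name])
  else (tm, ng, c, nr ++ [symbol])

-- body of A's `for rule in rules` loop (new_grammar[…].append via Dict.modify = defaultdict append)
def pvA_rule (lhs : String)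
    (acc : PySem.Dict String String × PySem.Dict String (List (List String)) × Int)
    (rule : List String) :
    PySem.Dict String String × PySem.Dict String (List (List String)) × Int :=
  let (tm, ng, c) := acc
  if 1 < rule.length then
    let r := rule.foldl pvA_sym (tm, ng, c, [])
    (r.1, r.2.1.modify lhs [] (fun v => v ++ [r.2.2.2]), r.2.2.1)
  else
    (tm, ng.modify lhs [] (fun v => v ++ [rule]), c)

def replace_terminals (grammar : List (String × List (List String))) :
    List (String × List (List String)) :=
  (grammar.foldl (fun acc p => p.2.foldl (pvA_rule p.1) acc)
      ((PySem.Dict.empty : PySem.Dict String String),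
       (PySem.Dict.empty : PySem.Dict String (List (List String))), (1 : Int))).2.1.items

-- ===== PORT B =====
-- Source B pass 1, innermost statement: name a qualifying symbol on first appearance
def pvB1_sym (tm : PySem.Dict String String) (symbol : String) : PySem.Dict String String :=
  if pvQual symbol && !tm.contains symbol then
    tm.insert symbol ("!_" ++ PySem.Int.toStr ((tm.size : Int) + 1))
  else tm

-- Source B pass 1, `for rule in rules`
def pvB1_rule (tm : PySem.Dict String String) (rule : List String) : PySem.Dict String String :=
  if 1 < rule.length then rule.foldl pvB1_sym tm else tm

-- Source B pass 2, inner `for symbol in rule` loop: first use of a new nonterminal adds its rule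
def pvB2_sym (tmap : PySem.Dict String String)
    (ng : PySem.Dict String (List (List String))) (symbol : String) :
    PySem.Dict String (List (List String)) :=
  match tmap.get? symbol with
  | some name => if ng.contains name then ng else ng.modify name [] (fun v => v ++ [[symbol]])
  | none => ng

-- Source B pass 2, `for rule in rules` (`tmap.get(s, s)` comprehension = map of getD)
def pvB2_rule (tmap : PySem.Dict String String) (lhs : String)
    (ng : PySem.Dict String (List (List String))) (rule : List String) :
    PySem.Dict String (List (List String)) :=
  if 1 < rule.length then
    (rule.foldl (pvB2_sym tmap) ng).modify lhs []
      (fun v => v ++ [rule.map (fun s => tmap.getD s s)])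
  else ng.modify lhs [] (fun v => v ++ [rule])

def replace_terminals_alt (grammar : List (String × List (List String))) :
    List (String × List (List String)) :=
  let tmap := grammar.foldl (fun tm p => p.2.foldl pvB1_rule tm)
      (PySem.Dict.empty : PySem.Dict String String)
  (grammar.foldl (fun ng p => p.2.foldl (pvB2_rule tmap p.1) ng)
      (PySem.Dict.empty : PySem.Dict String (List (List String)))).items

-- ===== PRECONDITION & SPEC =====
-- a key of the exact shape of a generated fresh name: "!_" followed by the decimal digits of a
-- positive integer (no leading zero)
def pvIsFreshName (k : String) : Bool :=
  match k.toList with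
  | a :: b :: d :: ds => a == '!' && b == '_' && (d :: ds).all (fun c => c.isDigit) && !(d == '0')
  | _ => false

-- Pre_ excludes grammars with a lhs key of the exact generated fresh-name shape
-- "!_<positive integer>": such a key collides with the fresh names the function itself
-- generates, a corner no caller would specify and on which either merging the two rule sets
-- (A) or keeping the caller's entry as is (B) is as defensible as the other.
def Pre_replace_terminals (grammar : List (String × List (List String))) : Prop :=
  ∀ p ∈ grammar, pvIsFreshName p.1 = false
instance (grammar : List (String × List (List String))) :
    Decidable (Pre_replace_terminals grammar) := by
  unfold Pre_replace_terminals; infer_instance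

def pvWitness_replace_terminals : (List (String × List (List String))) :=
  [("S", [["a", "b"], ["S", "c"]]), ("T", [["a"]])]

def Spec_replace_terminals (grammar : List (String × List (List String)))
    (out : List (String × List (List String))) : Prop :=
  out = replace_terminals_alt grammar
instance (grammar : List (String × List (List String))) (out : List (String × List (List String))) :
    Decidable (Spec_replace_terminals grammar out) := by
  unfold Spec_replace_terminals; infer_instance

-- ===== CLAIM (what is proved, stated in full; the proofs are below) =====
def Claim_equal_replace_terminals : Prop :=
  ∀ (grammar : List (String × List (List String))), Dom_replace_terminals grammar →
    Pre_replace_terminals grammar →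
    Spec_replace_terminals grammar (replace_terminals grammar)

-- ===== LEMMAS AND PROOFS =====
-- (rest of file below)

-- decimal digits of a natural number, by well-founded recursion (= Nat.toDigits 10)
def pvDecDigits (n : Nat) : List Char :=
  if n < 10 then [Nat.digitChar n]
  else pvDecDigits (n / 10) ++ [Nat.digitChar (n % 10)]
decreasing_by exact Nat.div_lt_self (by omega) (by omega)

theorem pv_dec_lt (n : Nat) (h : n < 10) : pvDecDigits n = [Nat.digitChar n] := by
  rw [pvDecDigits]; simp [h]

theorem pv_dec_ge (n : Nat) (h : ¬ n < 10) :
    pvDecDigits n = pvDecDigits (n / 10) ++ [Nat.digitChar (n % 10)] := by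
  rw [pvDecDigits]; simp [h]

theorem pv_toDigitsCore_eq (f : Nat) : ∀ (n : Nat) (ds : List Char), n < f →
    Nat.toDigitsCore 10 f n ds = pvDecDigits n ++ ds := by
  induction f with
  | zero => intro n ds h; omega
  | succ f ih =>
    intro n ds hnf
    rw [Nat.toDigitsCore]
    by_cases h10 : n < 10
    · have hz : n / 10 = 0 := Nat.div_eq_of_lt h10
      rw [pv_dec_lt n h10]
      simp [hz, Nat.mod_eq_of_lt h10]
    · have hpos : 0 < n / 10 := Nat.div_pos (by omega) (by omega)
      have hlt : n / 10 < f := by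
        have hds : n / 10 < n := Nat.div_lt_self (by omega) (by omega)
        omega
      rw [if_neg (by omega), ih (n / 10) _ hlt, pv_dec_ge n h10]
      simp

theorem pv_digitChar_inj (a b : Nat) (ha : a < 10) (hb : b < 10)
    (h : Nat.digitChar a = Nat.digitChar b) : a = b := by
  interval_cases a <;> interval_cases b <;> revert h <;> decide

theorem pv_decDigits_ne_nil (n : Nat) : pvDecDigits n ≠ [] := by
  rw [pvDecDigits]; split <;> simp

theorem pv_decDigits_inj (m : Nat) : ∀ n, pvDecDigits m = pvDecDigits n → m = n := by
  induction m using Nat.strong_induction_on with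
  | _ m ih =>
    intro n h
    by_cases hm : m < 10 <;> by_cases hn : n < 10
    · rw [pv_dec_lt m hm, pv_dec_lt n hn] at h
      exact pv_digitChar_inj _ _ hm hn (by simpa using h)
    · rw [pv_dec_lt m hm, pv_dec_ge n hn] at h
      have hl := congrArg List.length h
      simp at hl
      exact absurd hl (pv_decDigits_ne_nil (n / 10))
    · rw [pv_dec_ge m hm, pv_dec_lt n hn] at h
      have hl := congrArg List.length h
      simp at hl
      exact absurd hl (pv_decDigits_ne_nil (m / 10))
    · rw [pv_dec_ge m hm, pv_dec_ge n hn] at h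
      obtain ⟨h1, h2⟩ := List.append_inj' h (by simp)
      have e1 := ih (m / 10) (Nat.div_lt_self (by omega) (by omega)) (n / 10) h1
      have e2 : m % 10 = n % 10 :=
        pv_digitChar_inj _ _ (Nat.mod_lt _ (by omega)) (Nat.mod_lt _ (by omega))
          (by simpa using h2)
      omega

def pvNameStr (j : Nat) : String := "!_" ++ PySem.Int.toStr (j : Int)

theorem pv_toStr_natCast (j : Nat) : PySem.Int.toStr (j : Int) = String.ofList (pvDecDigits j) := by
  have h0 : ¬ ((j : Int) < 0) := by omega
  simp [PySem.Int.toStr, PySem.Int.toChars, Nat.toDigits, h0,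
    pv_toDigitsCore_eq (j + 1) j [] (by omega)]

theorem pv_nameStr_inj {i j : Nat} (h : pvNameStr i = pvNameStr j) : i = j := by
  have hl := congrArg String.toList h
  rw [pvNameStr, pvNameStr, pv_toStr_natCast, pv_toStr_natCast] at hl
  simp only [String.toList_append, String.toList_ofList] at hl
  exact pv_decDigits_inj i j (List.append_cancel_left hl)

theorem pv_dec_all_digits (n : Nat) : ∀ c ∈ pvDecDigits n, c.isDigit = true := by
  induction n using Nat.strong_induction_on with
  | _ n ih =>
    have hdig : ∀ a : Nat, a < 10 → (Nat.digitChar a).isDigit = true := by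
      intro a ha; interval_cases a <;> decide
    by_cases hn : n < 10
    · rw [pv_dec_lt n hn]
      intro c hc
      rw [List.mem_singleton.mp hc]
      exact hdig n hn
    · rw [pv_dec_ge n hn]
      intro c hc
      rcases List.mem_append.mp hc with h1 | h2
      · exact ih (n / 10) (Nat.div_lt_self (by omega) (by omega)) c h1
      · rw [List.mem_singleton.mp h2]
        exact hdig _ (Nat.mod_lt _ (by omega))

theorem pv_dec_head_ne (n : Nat) : 1 ≤ n → ∀ d ds, pvDecDigits n = d :: ds → d ≠ '0' := by
  induction n using Nat.strong_induction_on with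
  | _ n ih =>
    intro hn d ds hd
    by_cases h10 : n < 10
    · rw [pv_dec_lt n h10] at hd
      simp only [List.cons.injEq] at hd
      rw [← hd.1]
      interval_cases n <;> decide
    · rw [pv_dec_ge n h10] at hd
      obtain ⟨d', ds', hdd⟩ := List.exists_cons_of_ne_nil (pv_decDigits_ne_nil (n / 10))
      rw [hdd] at hd
      simp only [List.cons_append, List.cons.injEq] at hd
      rw [← hd.1] at *
      exact ih (n / 10) (Nat.div_lt_self (by omega) (by omega))
        (Nat.one_le_div_iff (by omega) |>.mpr (by omega)) d' ds' hdd

theorem pv_freshName_name (j : Nat) (hj : 1 ≤ j) : pvIsFreshName (pvNameStr j) = true := by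
  obtain ⟨d, ds, hdd⟩ := List.exists_cons_of_ne_nil (pv_decDigits_ne_nil j)
  have ht : (pvNameStr j).toList = '!' :: '_' :: d :: ds := by
    rw [pvNameStr, pv_toStr_natCast, String.toList_append, String.toList_ofList, ← hdd]
    simp
  rw [pvIsFreshName, ht]
  have hall : ∀ c ∈ d :: ds, c.isDigit = true := by
    intro c hc; exact pv_dec_all_digits j c (hdd ▸ hc)
  have hne : d ≠ '0' := pv_dec_head_ne j hj d ds hdd
  have h1 : ((d :: ds).all fun c => c.isDigit) = true := by
    rw [List.all_eq_true]; intro c hc; simp [hall c hc]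
  simp [h1, hne]

theorem pv_name_cast (n : Nat) : "!_" ++ PySem.Int.toStr ((n : Int) + 1) = pvNameStr (n + 1) := by
  rw [pvNameStr, Nat.cast_add, Nat.cast_one]

-- flattening the naming pass to one fold over the stream of long-rule symbols ----------------

def pvStreamRules (rules : List (List String)) : List String :=
  rules.flatMap (fun r => if 1 < r.length then r else [])

def pvStreamG (g : List (String × List (List String))) : List String :=
  g.flatMap (fun p => pvStreamRules p.2)

theorem pv_flat_rules (rules : List (List String)) : ∀ tm : PySem.Dict String String,
    rules.foldl pvB1_rule tm = (pvStreamRules rules).foldl pvB1_sym tm := by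
  induction rules with
  | nil => intro tm; simp [pvStreamRules]
  | cons r rs ih =>
    intro tm
    have hs : pvStreamRules (r :: rs) = (if 1 < r.length then r else []) ++ pvStreamRules rs := by
      simp [pvStreamRules]
    rw [List.foldl_cons, hs, List.foldl_append, ih]
    congr 1
    by_cases h : 1 < r.length <;> simp [pvB1_rule, h]

theorem pv_flat_g (g : List (String × List (List String))) : ∀ tm : PySem.Dict String String,
    g.foldl (fun tm p => p.2.foldl pvB1_rule tm) tm = (pvStreamG g).foldl pvB1_sym tm := by
  induction g with
  | nil => intro tm; simp [pvStreamG]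
  | cons p ps ih =>
    intro tm
    have hs : pvStreamG (p :: ps) = pvStreamRules p.2 ++ pvStreamG ps := by
      simp [pvStreamG]
    rw [List.foldl_cons, hs, List.foldl_append, ih, pv_flat_rules]

-- well-formedness of the terminal map: fresh-shaped injective values, qualifying keys --------

def pvGood (tm : PySem.Dict String String) : Prop :=
  (∀ s v, tm.get? s = some v → ∃ j, 1 ≤ j ∧ j ≤ tm.size ∧ v = pvNameStr j ∧ pvQual s = true) ∧
  (∀ s₁ s₂ v, tm.get? s₁ = some v → tm.get? s₂ = some v → s₁ = s₂)

theorem pv_good_empty : pvGood (PySem.Dict.empty : PySem.Dict String String) := by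
  constructor
  · intro s v h; rw [PySem.Dict.get?_empty] at h; cases h
  · intro s₁ s₂ v h; rw [PySem.Dict.get?_empty] at h; cases h

theorem pv_good_step (tm : PySem.Dict String String) (x : String) (h : pvGood tm) :
    pvGood (pvB1_sym tm x) := by
  rw [pvB1_sym]
  split
  case isTrue hc =>
    have hcf : tm.contains x = false := by
      rcases Bool.and_eq_true_iff.mp hc with ⟨_, h2⟩
      simpa using h2
    have hq : pvQual x = true := (Bool.and_eq_true_iff.mp hc).1
    have hsz : (tm.insert x ("!_" ++ PySem.Int.toStr ((tm.size : Int) + 1))).size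
        = tm.size + 1 := by
      rw [PySem.Dict.size_insert]; simp [hcf]
    have hname : ("!_" ++ PySem.Int.toStr ((tm.size : Int) + 1)) = pvNameStr (tm.size + 1) :=
      pv_name_cast tm.size
    constructor
    · intro s v hs
      by_cases hsx : s = x
      · subst hsx
        rw [PySem.Dict.get?_insert_self] at hs
        exact ⟨tm.size + 1, by omega, by rw [hsz],
          (Option.some_inj.mp hs).symm.trans hname, hq⟩
      · rw [PySem.Dict.get?_insert_of_ne _ _ hsx] at hs
        obtain ⟨j, hj1, hj2, hj3, hj4⟩ := h.1 s v hs
        exact ⟨j, hj1, by rw [hsz]; omega, hj3, hj4⟩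
    · intro s₁ s₂ v h1 h2
      by_cases e1 : s₁ = x <;> by_cases e2 : s₂ = x
      · rw [e1, e2]
      · subst e1
        rw [PySem.Dict.get?_insert_self] at h1
        rw [PySem.Dict.get?_insert_of_ne _ _ e2] at h2
        obtain ⟨j, hj1, hj2, hj3, _⟩ := h.1 s₂ v h2
        have hv : v = pvNameStr (tm.size + 1) := by
          rw [← hname]; exact (Option.some_inj.mp h1).symm
        have heq : pvNameStr (tm.size + 1) = pvNameStr j := by rw [← hv, hj3]
        have := pv_nameStr_inj heq
        omega
      · subst e2
        rw [PySem.Dict.get?_insert_self] at h2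
        rw [PySem.Dict.get?_insert_of_ne _ _ e1] at h1
        obtain ⟨j, hj1, hj2, hj3, _⟩ := h.1 s₁ v h1
        have hv : v = pvNameStr (tm.size + 1) := by
          rw [← hname]; exact (Option.some_inj.mp h2).symm
        have heq : pvNameStr (tm.size + 1) = pvNameStr j := by rw [← hv, hj3]
        have := pv_nameStr_inj heq
        omega
      · rw [PySem.Dict.get?_insert_of_ne _ _ e1] at h1
        rw [PySem.Dict.get?_insert_of_ne _ _ e2] at h2
        exact h.2 s₁ s₂ v h1 h2
  case isFalse => exact h

theorem pv_good_fold (xs : List String) : ∀ tm : PySem.Dict String String,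
    pvGood tm → pvGood (xs.foldl pvB1_sym tm) := by
  induction xs with
  | nil => intro tm h; simpa using h
  | cons x t ih =>
    intro tm h
    rw [List.foldl_cons]
    exact ih _ (pv_good_step tm x h)

theorem pv_fold1_stable (xs : List String) : ∀ (tm : PySem.Dict String String) (s : String),
    tm.contains s = true → (xs.foldl pvB1_sym tm).get? s = tm.get? s := by
  induction xs with
  | nil => intro tm s _; simp
  | cons x t ih =>
    intro tm s hs
    rw [List.foldl_cons, pvB1_sym]
    split
    case isTrue hc =>
      have hcf : tm.contains x = false := by
        rcases Bool.and_eq_true_iff.mp hc with ⟨_, h2⟩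
        simpa using h2
      have hne : s ≠ x := by
        intro he; rw [he, hcf] at hs; cases hs
      have hcont : (tm.insert x ("!_" ++ PySem.Int.toStr ((tm.size : Int) + 1))).contains s
          = true := by
        rw [PySem.Dict.contains_insert]; simp [hs]
      rw [ih _ s hcont, PySem.Dict.get?_insert_of_ne _ _ hne]
    case isFalse => exact ih tm s hs

-- the coupled symbol loops: A's one interleaved pass agrees with B's naming fold, B's
-- emission fold, and B's lookup map, symbol by symbol -----------------------------------------

theorem pv_sym (M : PySem.Dict String String) (hGM : pvGood M) (rest : List String) :
    ∀ (xs : List String) (tm : PySem.Dict String String)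
      (ng : PySem.Dict String (List (List String))) (nr : List String),
    (xs ++ rest).foldl pvB1_sym tm = M →
    (∀ s v, tm.get? s = some v → ng.contains v = true) →
    (∀ k, ng.contains k = true → (∃ s, tm.get? s = some k) ∨ pvIsFreshName k = false) →
    xs.foldl pvA_sym (tm, ng, (tm.size : Int) + 1, nr)
      = (xs.foldl pvB1_sym tm, xs.foldl (pvB2_sym M) ng,
         ((xs.foldl pvB1_sym tm).size : Int) + 1, nr ++ xs.map (fun s => M.getD s s))
    ∧ (∀ s v, (xs.foldl pvB1_sym tm).get? s = some v →
        (xs.foldl (pvB2_sym M) ng).contains v = true)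
    ∧ (∀ k, (xs.foldl (pvB2_sym M) ng).contains k = true →
        (∃ s, (xs.foldl pvB1_sym tm).get? s = some k) ∨ pvIsFreshName k = false) := by
  intro xs
  induction xs with
  | nil =>
    intro tm ng nr _ h3a h3b
    exact ⟨by simp, by simpa using h3a, by simpa using h3b⟩
  | cons x t ih =>
    intro tm ng nr HM h3a h3b
    cases hq : pvQual x with
    | true =>
      cases hget : tm.get? x with
      | some name =>
        have hcont : tm.contains x = true := by
          rw [PySem.Dict.contains_eq_isSome_get?, hget]; rfl
        have hB1 : pvB1_sym tm x = tm := by simp [pvB1_sym, hcont]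
        have hMx : M.get? x = some name := by
          have hst := pv_fold1_stable ((x :: t) ++ rest) tm x hcont
          rw [HM] at hst; rw [hst, hget]
        have hA : pvA_sym (tm, ng, (tm.size : Int) + 1, nr) x
            = (tm, ng, (tm.size : Int) + 1, nr ++ [name]) := by
          simp [pvA_sym, hq, hget]
        have hB2 : pvB2_sym M ng x = ng := by
          have hngc : ng.contains name = true := h3a x name hget
          simp [pvB2_sym, hMx, hngc]
        have hmap : M.getD x x = name := by rw [PySem.Dict.getD_eq_get?_getD, hMx]; rfl
        have HM' : (t ++ rest).foldl pvB1_sym tm = M := by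
          have h0 : ((x :: t) ++ rest).foldl pvB1_sym tm
              = (t ++ rest).foldl pvB1_sym (pvB1_sym tm x) := by simp
          rw [h0, hB1] at HM; exact HM
        obtain ⟨E, I1, I2⟩ := ih tm ng (nr ++ [name]) HM' h3a h3b
        refine ⟨?_, ?_, ?_⟩
        · simp only [List.foldl_cons, List.map_cons, hA, hB1, hB2, hmap]
          rw [E]; simp
        · simp only [List.foldl_cons, hB1, hB2]; exact I1
        · simp only [List.foldl_cons, hB1, hB2]; exact I2
      | none =>
        have hcont : tm.contains x = false :=
          (PySem.Dict.get?_eq_none_iff_contains tm x).mp hget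
        have hstep : (pvQual x && !tm.contains x) = true := by simp [hq, hcont]
        have hB1 : pvB1_sym tm x
            = tm.insert x ("!_" ++ PySem.Int.toStr ((tm.size : Int) + 1)) := by
          simp [pvB1_sym, hstep]
        have HM' : (t ++ rest).foldl pvB1_sym
            (tm.insert x ("!_" ++ PySem.Int.toStr ((tm.size : Int) + 1))) = M := by
          have h0 : ((x :: t) ++ rest).foldl pvB1_sym tm
              = (t ++ rest).foldl pvB1_sym (pvB1_sym tm x) := by simp
          rw [h0, hB1] at HM; exact HM
        have hcont2 : (tm.insert x ("!_" ++ PySem.Int.toStr ((tm.size : Int) + 1))).contains x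
            = true := by rw [PySem.Dict.contains_insert]; simp
        have hMx : M.get? x = some ("!_" ++ PySem.Int.toStr ((tm.size : Int) + 1)) := by
          have hst := pv_fold1_stable (t ++ rest) _ x hcont2
          rw [HM'] at hst; rw [hst, PySem.Dict.get?_insert_self]
        have hA : pvA_sym (tm, ng, (tm.size : Int) + 1, nr) x
            = (tm.insert x ("!_" ++ PySem.Int.toStr ((tm.size : Int) + 1)),
               ng.modify ("!_" ++ PySem.Int.toStr ((tm.size : Int) + 1)) []
                 (fun v => v ++ [[x]]),
               ((tm.size : Int) + 1) + 1,
               nr ++ ["!_" ++ PySem.Int.toStr ((tm.size : Int) + 1)]) := by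
          simp [pvA_sym, hq, hget]
        have hfresh : pvIsFreshName ("!_" ++ PySem.Int.toStr ((tm.size : Int) + 1)) = true := by
          rw [pv_name_cast]; exact pv_freshName_name (tm.size + 1) (by omega)
        have hngc : ng.contains ("!_" ++ PySem.Int.toStr ((tm.size : Int) + 1)) = false := by
          cases hcc : ng.contains ("!_" ++ PySem.Int.toStr ((tm.size : Int) + 1)) with
          | false => rfl
          | true =>
            rcases h3b _ hcc with ⟨u, hu⟩ | hf
            · have hcu : tm.contains u = true := by
                rw [PySem.Dict.contains_eq_isSome_get?, hu]; rfl
              have hMu : M.get? u = some ("!_" ++ PySem.Int.toStr ((tm.size : Int) + 1)) := by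
                have hst := pv_fold1_stable ((x :: t) ++ rest) tm u hcu
                rw [HM] at hst; rw [hst, hu]
              have hux : u = x := hGM.2 u x _ hMu hMx
              rw [hux, hget] at hu; cases hu
            · rw [hf] at hfresh; cases hfresh
        have hB2 : pvB2_sym M ng x
            = ng.modify ("!_" ++ PySem.Int.toStr ((tm.size : Int) + 1)) []
                (fun v => v ++ [[x]]) := by
          simp [pvB2_sym, hMx, hngc]
        have hmap : M.getD x x = "!_" ++ PySem.Int.toStr ((tm.size : Int) + 1) := by
          rw [PySem.Dict.getD_eq_get?_getD, hMx]; rfl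
        have hsz : ((tm.size : Int) + 1) + 1
            = (((tm.insert x ("!_" ++ PySem.Int.toStr ((tm.size : Int) + 1))).size : Int)
               + 1) := by
          rw [PySem.Dict.size_insert]; simp [hcont]
        have h3a' : ∀ s v,
            (tm.insert x ("!_" ++ PySem.Int.toStr ((tm.size : Int) + 1))).get? s = some v →
            (ng.modify ("!_" ++ PySem.Int.toStr ((tm.size : Int) + 1)) []
              (fun v => v ++ [[x]])).contains v = true := by
          intro s v hs
          rw [PySem.Dict.contains_modify]
          by_cases hsx : s = x
          · subst hsx
            rw [PySem.Dict.get?_insert_self] at hs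
            simp [← Option.some_inj.mp hs]
          · rw [PySem.Dict.get?_insert_of_ne _ _ hsx] at hs
            simp [h3a s v hs]
        have h3b' : ∀ k,
            (ng.modify ("!_" ++ PySem.Int.toStr ((tm.size : Int) + 1)) []
              (fun v => v ++ [[x]])).contains k = true →
            (∃ s, (tm.insert x ("!_" ++ PySem.Int.toStr ((tm.size : Int) + 1))).get? s
              = some k) ∨ pvIsFreshName k = false := by
          intro k hk
          rw [PySem.Dict.contains_modify] at hk
          rcases Bool.or_eq_true_iff.mp hk with hk1 | hk2
          · left
            refine ⟨x, ?_⟩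
            rw [PySem.Dict.get?_insert_self]
            exact congrArg some (eq_of_beq hk1).symm
          · rcases h3b k hk2 with ⟨u, hu⟩ | hf
            · left
              have hux : u ≠ x := by intro he; rw [he, hget] at hu; cases hu
              exact ⟨u, by rw [PySem.Dict.get?_insert_of_ne _ _ hux]; exact hu⟩
            · right; exact hf
        obtain ⟨E, I1, I2⟩ := ih _ _
          (nr ++ ["!_" ++ PySem.Int.toStr ((tm.size : Int) + 1)]) HM' h3a' h3b'
        refine ⟨?_, ?_, ?_⟩
        · simp only [List.foldl_cons, List.map_cons, hA, hB1, hB2, hmap, hsz]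
          rw [E]; simp
        · simp only [List.foldl_cons, hB1, hB2]; exact I1
        · simp only [List.foldl_cons, hB1, hB2]; exact I2
    | false =>
      have hB1 : pvB1_sym tm x = tm := by simp [pvB1_sym, hq]
      have hMx : M.get? x = none := by
        cases hmx : M.get? x with
        | none => rfl
        | some v =>
          obtain ⟨j, _, _, _, hqv⟩ := hGM.1 x v hmx
          rw [hq] at hqv; cases hqv
      have hA : pvA_sym (tm, ng, (tm.size : Int) + 1, nr) x
          = (tm, ng, (tm.size : Int) + 1, nr ++ [x]) := by
        simp [pvA_sym, hq]
      have hB2 : pvB2_sym M ng x = ng := by simp [pvB2_sym, hMx]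
      have hmap : M.getD x x = x := by rw [PySem.Dict.getD_eq_get?_getD, hMx]; rfl
      have HM' : (t ++ rest).foldl pvB1_sym tm = M := by
        have h0 : ((x :: t) ++ rest).foldl pvB1_sym tm
            = (t ++ rest).foldl pvB1_sym (pvB1_sym tm x) := by simp
        rw [h0, hB1] at HM; exact HM
      obtain ⟨E, I1, I2⟩ := ih tm ng (nr ++ [x]) HM' h3a h3b
      refine ⟨?_, ?_, ?_⟩
      · simp only [List.foldl_cons, List.map_cons, hA, hB1, hB2, hmap]
        rw [E]; simp
      · simp only [List.foldl_cons, hB1, hB2]; exact I1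
      · simp only [List.foldl_cons, hB1, hB2]; exact I2

-- the coupled rule loops ----------------------------------------------------------------------

theorem pv_rules (M : PySem.Dict String String) (hGM : pvGood M) (lhs : String)
    (hl : pvIsFreshName lhs = false) :
    ∀ (rules : List (List String)) (tm : PySem.Dict String String)
      (ng : PySem.Dict String (List (List String))) (rest : List String),
    (pvStreamRules rules ++ rest).foldl pvB1_sym tm = M →
    (∀ s v, tm.get? s = some v → ng.contains v = true) →
    (∀ k, ng.contains k = true → (∃ s, tm.get? s = some k) ∨ pvIsFreshName k = false) →
    rules.foldl (pvA_rule lhs) (tm, ng, (tm.size : Int) + 1)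
      = (rules.foldl pvB1_rule tm, rules.foldl (pvB2_rule M lhs) ng,
         ((rules.foldl pvB1_rule tm).size : Int) + 1)
    ∧ (∀ s v, (rules.foldl pvB1_rule tm).get? s = some v →
        (rules.foldl (pvB2_rule M lhs) ng).contains v = true)
    ∧ (∀ k, (rules.foldl (pvB2_rule M lhs) ng).contains k = true →
        (∃ s, (rules.foldl pvB1_rule tm).get? s = some k) ∨ pvIsFreshName k = false) := by
  intro rules
  induction rules with
  | nil =>
    intro tm ng rest _ h3a h3b
    exact ⟨by simp, by simpa using h3a, by simpa using h3b⟩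
  | cons r rs ih =>
    intro tm ng rest HM h3a h3b
    have hstream : pvStreamRules (r :: rs)
        = (if 1 < r.length then r else []) ++ pvStreamRules rs := by
      simp [pvStreamRules]
    by_cases hlen : 1 < r.length
    · have HMr : (r ++ (pvStreamRules rs ++ rest)).foldl pvB1_sym tm = M := by
        rw [← HM, hstream, if_pos hlen]; simp
      obtain ⟨E, I1, I2⟩ := pv_sym M hGM (pvStreamRules rs ++ rest) r tm ng [] HMr h3a h3b
      have hA : pvA_rule lhs (tm, ng, (tm.size : Int) + 1) r
          = (r.foldl pvB1_sym tm,
             (r.foldl (pvB2_sym M) ng).modify lhs []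
               (fun v => v ++ [r.map (fun s => M.getD s s)]),
             ((r.foldl pvB1_sym tm).size : Int) + 1) := by
        simp only [pvA_rule, if_pos hlen, E, List.nil_append]
      have hB1 : pvB1_rule tm r = r.foldl pvB1_sym tm := by simp [pvB1_rule, hlen]
      have hB2 : pvB2_rule M lhs ng r
          = (r.foldl (pvB2_sym M) ng).modify lhs []
              (fun v => v ++ [r.map (fun s => M.getD s s)]) := by
        simp [pvB2_rule, hlen]
      have h3a' : ∀ s v, (r.foldl pvB1_sym tm).get? s = some v →
          ((r.foldl (pvB2_sym M) ng).modify lhs []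
            (fun v => v ++ [r.map (fun s => M.getD s s)])).contains v = true := by
        intro s v hs
        rw [PySem.Dict.contains_modify]
        simp [I1 s v hs]
      have h3b' : ∀ k, ((r.foldl (pvB2_sym M) ng).modify lhs []
            (fun v => v ++ [r.map (fun s => M.getD s s)])).contains k = true →
          (∃ s, (r.foldl pvB1_sym tm).get? s = some k) ∨ pvIsFreshName k = false := by
        intro k hk
        rw [PySem.Dict.contains_modify] at hk
        rcases Bool.or_eq_true_iff.mp hk with hk1 | hk2
        · right; rw [eq_of_beq hk1]; exact hl
        · exact I2 k hk2
      have HM' : (pvStreamRules rs ++ rest).foldl pvB1_sym (r.foldl pvB1_sym tm) = M := by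
        rw [← HMr]; simp [List.foldl_append]
      obtain ⟨E2, J1, J2⟩ := ih (r.foldl pvB1_sym tm) _ rest HM' h3a' h3b'
      refine ⟨?_, ?_, ?_⟩
      · simp only [List.foldl_cons, hA, hB1, hB2]; exact E2
      · simp only [List.foldl_cons, hB1, hB2]; exact J1
      · simp only [List.foldl_cons, hB1, hB2]; exact J2
    · have hA : pvA_rule lhs (tm, ng, (tm.size : Int) + 1) r
          = (tm, ng.modify lhs [] (fun v => v ++ [r]), (tm.size : Int) + 1) := by
        simp only [pvA_rule, if_neg hlen]
      have hB1 : pvB1_rule tm r = tm := by simp [pvB1_rule, hlen]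
      have hB2 : pvB2_rule M lhs ng r = ng.modify lhs [] (fun v => v ++ [r]) := by
        simp [pvB2_rule, hlen]
      have h3a' : ∀ s v, tm.get? s = some v →
          (ng.modify lhs [] (fun v => v ++ [r])).contains v = true := by
        intro s v hs
        rw [PySem.Dict.contains_modify]
        simp [h3a s v hs]
      have h3b' : ∀ k, (ng.modify lhs [] (fun v => v ++ [r])).contains k = true →
          (∃ s, tm.get? s = some k) ∨ pvIsFreshName k = false := by
        intro k hk
        rw [PySem.Dict.contains_modify] at hk
        rcases Bool.or_eq_true_iff.mp hk with hk1 | hk2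
        · right; rw [eq_of_beq hk1]; exact hl
        · exact h3b k hk2
      have HM' : (pvStreamRules rs ++ rest).foldl pvB1_sym tm = M := by
        rw [← HM, hstream, if_neg hlen]; simp
      obtain ⟨E2, J1, J2⟩ := ih tm _ rest HM' h3a' h3b'
      refine ⟨?_, ?_, ?_⟩
      · simp only [List.foldl_cons, hA, hB1, hB2]; exact E2
      · simp only [List.foldl_cons, hB1, hB2]; exact J1
      · simp only [List.foldl_cons, hB1, hB2]; exact J2

-- the coupled grammar loops -------------------------------------------------------------------

theorem pv_gram (M : PySem.Dict String String) (hGM : pvGood M) :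
    ∀ (g : List (String × List (List String))) (tm : PySem.Dict String String)
      (ng : PySem.Dict String (List (List String))) (rest : List String),
    (∀ p ∈ g, pvIsFreshName p.1 = false) →
    (pvStreamG g ++ rest).foldl pvB1_sym tm = M →
    (∀ s v, tm.get? s = some v → ng.contains v = true) →
    (∀ k, ng.contains k = true → (∃ s, tm.get? s = some k) ∨ pvIsFreshName k = false) →
    g.foldl (fun acc p => p.2.foldl (pvA_rule p.1) acc) (tm, ng, (tm.size : Int) + 1)
      = (g.foldl (fun tm p => p.2.foldl pvB1_rule tm) tm,
         g.foldl (fun ng p => p.2.foldl (pvB2_rule M p.1) ng) ng,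
         ((g.foldl (fun tm p => p.2.foldl pvB1_rule tm) tm).size : Int) + 1) := by
  intro g
  induction g with
  | nil => intro tm ng rest _ _ _ _; simp
  | cons p ps ih =>
    intro tm ng rest hpre HM h3a h3b
    have hstream : pvStreamG (p :: ps) = pvStreamRules p.2 ++ pvStreamG ps := by
      simp [pvStreamG]
    have HMr : (pvStreamRules p.2 ++ (pvStreamG ps ++ rest)).foldl pvB1_sym tm = M := by
      rw [← HM, hstream]; simp
    obtain ⟨E, I1, I2⟩ := pv_rules M hGM p.1 (hpre p (List.mem_cons_self))
      p.2 tm ng (pvStreamG ps ++ rest) HMr h3a h3b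
    have HM' : (pvStreamG ps ++ rest).foldl pvB1_sym (p.2.foldl pvB1_rule tm) = M := by
      rw [← HMr, pv_flat_rules]; simp [List.foldl_append]
    have hrec := ih (p.2.foldl pvB1_rule tm) (p.2.foldl (pvB2_rule M p.1) ng) rest
      (fun q hq => hpre q (List.mem_cons_of_mem _ hq)) HM' I1 I2
    simp only [List.foldl_cons, E]
    exact hrec

-- ===== VERDICT (by name: the statement is the Claim_ definition above) =====
theorem replace_terminals_spec : Claim_equal_replace_terminals := by
  unfold Claim_equal_replace_terminals
  intro g _ hpre
  unfold Spec_replace_terminals replace_terminals replace_terminals_alt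
  show _ = (g.foldl
      (fun ng p => p.2.foldl
        (pvB2_rule (g.foldl (fun tm p => p.2.foldl pvB1_rule tm)
          (PySem.Dict.empty : PySem.Dict String String)) p.1) ng)
      (PySem.Dict.empty : PySem.Dict String (List (List String)))).items
  have hMfold : (pvStreamG g ++ []).foldl pvB1_sym (PySem.Dict.empty : PySem.Dict String String)
      = g.foldl (fun tm p => p.2.foldl pvB1_rule tm)
          (PySem.Dict.empty : PySem.Dict String String) := by
    rw [List.append_nil, pv_flat_g]
  have hGM : pvGood (g.foldl (fun tm p => p.2.foldl pvB1_rule tm)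
      (PySem.Dict.empty : PySem.Dict String String)) := by
    rw [pv_flat_g]
    exact pv_good_fold _ _ pv_good_empty
  have h3a : ∀ s v, (PySem.Dict.empty : PySem.Dict String String).get? s = some v →
      (PySem.Dict.empty : PySem.Dict String (List (List String))).contains v = true := by
    intro s v h; rw [PySem.Dict.get?_empty] at h; cases h
  have h3b : ∀ k, (PySem.Dict.empty : PySem.Dict String (List (List String))).contains k
      = true → (∃ s, (PySem.Dict.empty : PySem.Dict String String).get? s = some k)
      ∨ pvIsFreshName k = false := by
    intro k h; rw [PySem.Dict.contains_empty] at h; cases h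
  have hone : (1 : Int)
      = ((PySem.Dict.empty : PySem.Dict String String).size : Int) + 1 := by
    simp [PySem.Dict.size_empty]
  have E := pv_gram _ hGM g PySem.Dict.empty PySem.Dict.empty [] hpre hMfold h3a h3b
  rw [hone, E]
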